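-- pv_equiv track=rewrite | github.com/cirosantilli/project-euler-solutions | solvers/747.py | _y_max_for_x
-- ===== SOURCE A (Python) =====
-- import math
--
-- def _min_n_and_square(x: int, y: int) -> tuple[int, int]:
--     """
--     Hard case parameterization (x,y) for one fixed uncut vertex:
--
--     Let D = x*y*(x+1)*(y+1).
--     Then the smallest n for which a valid configuration exists is:
--         n_min = 2xy + x + y + 1 + ceil( 2*sqrt(D) )
--     If D is a perfect square then at n = n_min there is exactly one solution,
--     otherwise there are two.
--
--     Returns (n_min, is_square_D).
--     """
--     # Compute ceil(2*sqrt(D)) exactly via integer sqrt on 4D.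
--     # 4D = 4*x*(x+1)*y*(y+1)
--     four_d = 4 * x * (x + 1) * y * (y + 1)
--     r = math.isqrt(four_d)
--     if r * r == four_d:
--         ceil2 = r
--         sq = 1
--     else:
--         ceil2 = r + 1
--         sq = 0
--     n_min = 2 * x * y + x + y + 1 + ceil2
--     return n_min, sq
--
-- def _y_max_for_x(m: int, x: int) -> int:
--     """
--     For fixed x>=1 in the hard case, find the maximum y>=x such that n_min(x,y) <= m.
--     If no y works, return x-1.
--     """
--     # A safe upper bound:
--     # n_min > 4*x*y, hence y <= (m-1)//(4*x).
--     # We use a slightly looser bound that avoids division by zero for small m.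
--     if 4 * x > m - 1:
--         return x - 1
--     hi = (m - 1) // (4 * x) + 2
--     if hi < x:
--         hi = x
--     # Binary search on y in [x, hi] for max satisfying n_min <= m
--     lo = x
--     ok = x - 1
--     while lo <= hi:
--         mid = (lo + hi) // 2
--         n_min, _ = _min_n_and_square(x, mid)
--         if n_min <= m:
--             ok = mid
--             lo = mid + 1
--         else:
--             hi = mid - 1
--     return ok
-- ===== SOURCE B (Python) =====
-- import math
--
-- def _y_max_for_x(m: int, x: int) -> int:
--     """
--     Closed form: n_min(x,y) <= m  <=>  S := (m-1-x) - (2x+1)*y >= 0  and  S*S >= 4*x*(x+1)*y*(y+1),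
--     and the second inequality expands to the monic quadratic y*y - B*y + P*P >= 0.
--     The answer is min(floor of the quadratic's smaller root, P // Q), clamped below by x-1.
--     """
--     if 4 * x > m - 1:
--         return x - 1
--     P = m - 1 - x
--     Q = 2 * x + 1
--     B = 2 * P * Q + 4 * x * (x + 1)
--     disc = B * B - 4 * P * P
--     s = math.isqrt(disc)
--     c = (B - s) // 2
--     if c * c - B * c + P * P < 0:
--         c -= 1
--     y = min(c, P // Q)
--     return y if y >= x else x - 1
-- ===== Notes on version B (the rewrite author's own statement) =====
-- stated objective: faster
-- what changed: Replaces the binary search over y by a closed form: the predicate n_min(x,y)<=m is a linear condition plus a monic quadratic in y, so B takes min(floor of the quadratic's smaller root via one isqrt, P//Q) and clamps, with one O(1) verification step for the isqrt rounding.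
-- outside the precondition, e.g. on _y_max_for_x(5, 0): A raises ZeroDivisionError, B returns 4; on _y_max_for_x(10, -1): A returns -1, B returns -2
import Mathlib
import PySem

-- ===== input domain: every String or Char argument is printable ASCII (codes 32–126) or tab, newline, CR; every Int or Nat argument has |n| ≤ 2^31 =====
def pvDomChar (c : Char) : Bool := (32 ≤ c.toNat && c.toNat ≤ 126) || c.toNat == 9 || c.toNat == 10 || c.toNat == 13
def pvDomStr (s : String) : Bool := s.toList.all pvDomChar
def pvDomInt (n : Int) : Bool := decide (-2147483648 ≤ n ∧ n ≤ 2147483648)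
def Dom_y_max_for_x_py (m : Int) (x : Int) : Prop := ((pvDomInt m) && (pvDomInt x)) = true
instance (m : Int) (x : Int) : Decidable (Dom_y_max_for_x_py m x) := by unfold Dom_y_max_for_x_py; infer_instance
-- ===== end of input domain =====

-- B replaces A's binary search on y by a closed-form root of the equivalent monic quadratic (one isqrt), for speed.

-- ===== PORT A =====
-- math.isqrt; both Pythons only reach it with a nonnegative argument, where Nat.sqrt is exact.
def pyIsqrt (n : Int) : Int := (Nat.sqrt n.toNat : Int)

def min_n_and_square (x y : Int) : Int × Int :=
  let four_d := 4 * x * (x + 1) * y * (y + 1)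
  let r := pyIsqrt four_d
  let ceil2 := if r * r = four_d then r else r + 1
  let sq : Int := if r * r = four_d then 1 else 0
  let n_min := 2 * x * y + x + y + 1 + ceil2
  (n_min, sq)

-- the while-loop of A's binary search, state (lo, hi, ok-accumulator)
def yLoopA (m x lo hi acc : Int) : Int :=
  if h : lo ≤ hi then
    let mid := PySem.Int.floordiv (lo + hi) 2
    if (min_n_and_square x mid).1 ≤ m then yLoopA m x (mid + 1) hi mid
    else yLoopA m x lo (mid - 1) acc
  else acc
termination_by (hi + 1 - lo).toNat
decreasing_by
  · have := PySem.Int.floordiv_two_mid_bounds h; omega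
  · have := PySem.Int.floordiv_two_mid_bounds h; omega

def y_max_for_x_py (m : Int) (x : Int) : Int :=
  if 4 * x > m - 1 then x - 1
  else
    let hi0 := PySem.Int.floordiv (m - 1) (4 * x) + 2
    let hi := if hi0 < x then x else hi0
    yLoopA m x x hi (x - 1)

-- ===== PORT B =====
def y_max_for_x_py_alt (m : Int) (x : Int) : Int :=
  if 4 * x > m - 1 then x - 1
  else
    let P := m - 1 - x
    let Q := 2 * x + 1
    let B := 2 * P * Q + 4 * x * (x + 1)
    let disc := B * B - 4 * P * P
    let s := pyIsqrt disc
    let c0 := PySem.Int.floordiv (B - s) 2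
    let c := if c0 * c0 - B * c0 + P * P < 0 then c0 - 1 else c0
    let y := min c (PySem.Int.floordiv P Q)
    if x ≤ y then y else x - 1

-- ===== PRECONDITION & SPEC =====
-- Pre_ restricts to the function's stated domain x ≥ 1 (plus the trivial early-guard region m-1 < 4x,
-- where both return x-1): at x = 0 with m ≥ 1 A raises ZeroDivisionError, and for x ≤ 0 past the guard
-- A's binary search over a bound derived for positive x returns accidental values B need not mirror.
def Pre_y_max_for_x_py (m : Int) (x : Int) : Prop := 1 ≤ x ∨ m - 1 < 4 * x
instance (m : Int) (x : Int) : Decidable (Pre_y_max_for_x_py m x) := by unfold Pre_y_max_for_x_py; infer_instance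
def pvWitness_y_max_for_x_py : Int × Int := (100, 3)

def Spec_y_max_for_x_py (m : Int) (x : Int) (out : Int) : Prop := out = y_max_for_x_py_alt m x
instance (m : Int) (x : Int) (out : Int) : Decidable (Spec_y_max_for_x_py m x out) := by unfold Spec_y_max_for_x_py; infer_instance

-- ===== CLAIM (what is proved, stated in full; the proofs are below) =====
def Claim_equal_y_max_for_x_py : Prop := ∀ (m : Int) (x : Int), Dom_y_max_for_x_py m x → Pre_y_max_for_x_py m x → Spec_y_max_for_x_py m x (y_max_for_x_py m x)

-- ===== LEMMAS AND PROOFS =====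

theorem pyIsqrt_bounds {n : Int} (hn : 0 ≤ n) :
    0 ≤ pyIsqrt n ∧ pyIsqrt n * pyIsqrt n ≤ n ∧ n < (pyIsqrt n + 1) * (pyIsqrt n + 1) := by
  unfold pyIsqrt
  have h1 : n.toNat.sqrt * n.toNat.sqrt ≤ n.toNat := by
    simpa [pow_two] using Nat.sqrt_le' n.toNat
  have h2 : n.toNat < (n.toNat.sqrt + 1) * (n.toNat.sqrt + 1) := by
    simpa [pow_two, Nat.succ_eq_add_one] using Nat.lt_succ_sqrt' n.toNat
  have e : ((n.toNat : Int)) = n := Int.toNat_of_nonneg hn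
  have h1' : ((Nat.sqrt n.toNat * Nat.sqrt n.toNat : Nat) : Int) ≤ ((n.toNat : Nat) : Int) :=
    Int.ofNat_le.mpr h1
  have h2' : ((n.toNat : Nat) : Int) < (((Nat.sqrt n.toNat + 1) * (Nat.sqrt n.toNat + 1) : Nat) : Int) :=
    Int.ofNat_lt.mpr h2
  push_cast at h1' h2'
  refine ⟨Int.natCast_nonneg _, by rw [e] at h1'; linarith, by rw [e] at h2'; linarith⟩

theorem consec_nonneg (x : Int) : 0 ≤ x * (x + 1) := by nlinarith [sq_nonneg (2 * x + 1)]

-- a ≤ b from a*a ≤ b*b, 0 ≤ a-ish bounds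
theorem le_of_mul_self_le_mul_self {a b : Int} (hb : 0 ≤ b) (h : a * a ≤ b * b) (ha : 0 ≤ a) : a ≤ b := by
  by_contra hc
  push_neg at hc
  nlinarith

-- abbreviations used only in the proofs
def Pv (m x : Int) : Int := m - 1 - x
def Qv (x : Int) : Int := 2 * x + 1
def Bv (m x : Int) : Int := 2 * Pv m x * Qv x + 4 * x * (x + 1)
def fv (m x y : Int) : Int := y * y - Bv m x * y + Pv m x * Pv m x
def okv (m x y : Int) : Prop := (min_n_and_square x y).1 ≤ m

-- B's candidate (the adjusted floor of the quadratic's smaller root) and B's pre-clamp answer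
def cB (m x : Int) : Int :=
  let c0 := PySem.Int.floordiv (Bv m x - pyIsqrt (Bv m x * Bv m x - 4 * Pv m x * Pv m x)) 2
  if c0 * c0 - Bv m x * c0 + Pv m x * Pv m x < 0 then c0 - 1 else c0
def yB (m x : Int) : Int := min (cB m x) (PySem.Int.floordiv (Pv m x) (Qv x))

theorem min_n_fst (x y : Int) :
    (min_n_and_square x y).1 =
      2 * x * y + x + y + 1 +
        (if pyIsqrt (4 * x * (x + 1) * y * (y + 1)) * pyIsqrt (4 * x * (x + 1) * y * (y + 1)) =
            4 * x * (x + 1) * y * (y + 1)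
         then pyIsqrt (4 * x * (x + 1) * y * (y + 1))
         else pyIsqrt (4 * x * (x + 1) * y * (y + 1)) + 1) := rfl

theorem alt_closed (m x : Int) (hg : ¬ (4 * x > m - 1)) :
    y_max_for_x_py_alt m x = (if x ≤ yB m x then yB m x else x - 1) := by
  unfold y_max_for_x_py_alt yB cB Bv Pv Qv
  rw [if_neg hg]

-- n_min(x,y) ≤ m  ↔  Q·y ≤ P ∧ f(y) ≥ 0
theorem okv_char (m x y : Int) :
    okv m x y ↔ (Qv x * y ≤ Pv m x ∧ 0 ≤ fv m x y) := by
  unfold okv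
  rw [min_n_fst]
  set fd := 4 * x * (x + 1) * y * (y + 1) with hfdd
  have hfd : 0 ≤ fd := by
    have h1 := consec_nonneg x
    have h2 := consec_nonneg y
    nlinarith
  obtain ⟨hr0, hr1, hr2⟩ := pyIsqrt_bounds hfd
  set r := pyIsqrt fd with hrd
  set S := m - (2 * x * y + x + y + 1) with hSd
  have key : S * S - fd = fv m x y := by rw [hSd, hfdd]; unfold fv Bv Pv Qv; ring
  have hq : Qv x * y = 2 * x * y + y := by unfold Qv; ring
  have hp : Pv m x = m - 1 - x := rfl
  have step : (0 ≤ S ∧ fd ≤ S * S) ↔ (Qv x * y ≤ Pv m x ∧ 0 ≤ fv m x y) := by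
    constructor
    · rintro ⟨h1, h2⟩
      exact ⟨by omega, by linarith⟩
    · rintro ⟨h1, h2⟩
      exact ⟨by omega, by linarith⟩
  rw [← step]
  split_ifs with hsq
  · constructor
    · intro h
      have hS : r ≤ S := by omega
      exact ⟨by omega, by nlinarith⟩
    · rintro ⟨h1, h2⟩
      have hsS : r * r ≤ S * S := by linarith
      have : r ≤ S := le_of_mul_self_le_mul_self h1 hsS hr0
      omega
  · constructor
    · intro h
      have hS : r + 1 ≤ S := by omega
      exact ⟨by omega, by nlinarith⟩
    · rintro ⟨h1, h2⟩
      have hne : r * r < fd := lt_of_le_of_ne hr1 hsq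
      have hsS : r * r ≤ S * S := by linarith
      have hrS : r ≤ S := le_of_mul_self_le_mul_self h1 hsS hr0
      have : S ≠ r := by
        intro hE
        rw [hE] at h2
        omega
      omega

-- if n_min(x,y) ≤ m with 1 ≤ x ≤ y then 4xy ≤ m-1 (the safe upper bound A relies on)
theorem okv_bound (m x y : Int) (hx : 1 ≤ x) (hy : x ≤ y) (h : okv m x y) : 4 * x * y ≤ m - 1 := by
  unfold okv at h
  rw [min_n_fst] at h
  set fd := 4 * x * (x + 1) * y * (y + 1) with hfdd
  have hfd : 0 ≤ fd := by nlinarith [consec_nonneg x, consec_nonneg y]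
  obtain ⟨hr0, hr1, hr2⟩ := pyIsqrt_bounds hfd
  set r := pyIsqrt fd with hrd
  have hxy : (2 * x * y) * (2 * x * y) ≤ fd := by
    have hh : 0 ≤ x * y * (x + y + 1) :=
      mul_nonneg (mul_nonneg (by linarith) (by linarith)) (by linarith)
    rw [hfdd]; nlinarith
  have hr : 2 * x * y ≤ r := by
    by_contra hc
    push_neg at hc
    nlinarith
  split_ifs at h <;> nlinarith

-- binary-search loop: if ok ↔ (· ≤ T) on [x, ∞) then the loop returns T
theorem yLoopA_eq (m x T : Int)
    (G : ∀ y, x ≤ y → ((min_n_and_square x y).1 ≤ m ↔ y ≤ T)) :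
    ∀ lo hi acc, x ≤ lo → (T < lo → acc = T) → T ≤ hi → yLoopA m x lo hi acc = T := by
  have main : ∀ n : Nat, ∀ lo hi acc, (hi + 1 - lo).toNat ≤ n →
      x ≤ lo → (T < lo → acc = T) → T ≤ hi → yLoopA m x lo hi acc = T := by
    intro n
    induction n with
    | zero =>
      intro lo hi acc hn h1 h2 h3
      rw [yLoopA]
      have hlh : ¬ lo ≤ hi := by omega
      rw [dif_neg hlh]
      exact h2 (by omega)
    | succ n ih =>
      intro lo hi acc hn h1 h2 h3
      rw [yLoopA]
      by_cases hlh : lo ≤ hi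
      · rw [dif_pos hlh]
        have hmid := PySem.Int.floordiv_two_mid_bounds hlh
        set mid := PySem.Int.floordiv (lo + hi) 2 with hmd
        by_cases hok : (min_n_and_square x mid).1 ≤ m
        · rw [if_pos hok]
          have hT : mid ≤ T := (G mid (by omega)).1 hok
          exact ih (mid + 1) hi mid (by omega) (by omega) (by omega) h3
        · rw [if_neg hok]
          have hT : T < mid := by
            by_contra hc
            exact hok ((G mid (by omega)).2 (by omega))
          exact ih lo (mid - 1) acc (by omega) h1 h2 (by omega)
      · rw [dif_neg hlh]
        exact h2 (by omega)
  exact fun lo hi acc => main (hi + 1 - lo).toNat lo hi acc le_rfl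

-- the closed form: ok y ↔ y ≤ yB, for y ≥ x, under the guard
set_option maxHeartbeats 1000000 in
theorem closed_form (m x : Int) (hx : 1 ≤ x) (hg : 4 * x ≤ m - 1) :
    ∀ y, x ≤ y → (okv m x y ↔ y ≤ yB m x) := by
  intro y hy
  have hy0 : 0 ≤ y := by omega
  rw [okv_char]
  unfold yB cB fv
  set P := Pv m x with hPd
  set Q := Qv x with hQd
  set Bq := Bv m x with hBd
  have hp : P = m - 1 - x := rfl
  have hqe : Q = 2 * x + 1 := rfl
  have hbe : Bq = 2 * P * Q + 4 * x * (x + 1) := by rw [hBd, hPd, hQd]; rfl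
  have hP : 3 * x ≤ P := by omega
  have hQ3 : 3 ≤ Q := by omega
  set disc := Bq * Bq - 4 * P * P with hdd
  have hdid : disc = 16 * x * (x + 1) * (m * (m - 1)) := by
    rw [hdd, hbe, hp, hqe]; ring
  have hd0 : 0 ≤ disc := by
    have h1 : 0 ≤ x * (x + 1) := consec_nonneg x
    have h2 : 0 ≤ (m - 1) * m := by have := consec_nonneg (m - 1); linarith
    nlinarith
  obtain ⟨hs0, hs1, hs2⟩ := pyIsqrt_bounds hd0
  set s := pyIsqrt disc with hsd
  set c0 := PySem.Int.floordiv (Bq - s) 2 with hc0d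
  have hc0 : 2 * c0 ≤ Bq - s ∧ Bq - s ≤ 2 * c0 + 1 := by
    have he : PySem.Int.floordiv (Bq - s) 2 = (Bq - s) / 2 :=
      PySem.Int.floordiv_eq_ediv_of_pos (by norm_num)
    rw [hc0d, he]
    omega
  set c := if c0 * c0 - Bq * c0 + P * P < 0 then c0 - 1 else c0 with hcd
  have hcc0 : c ≤ c0 := by rw [hcd]; split_ifs <;> omega
  -- f(c) ≥ 0
  have hfc : 0 ≤ c * c - Bq * c + P * P := by
    rw [hcd]; split_ifs with hneg
    · have hid : 4 * ((c0 - 1) * (c0 - 1) - Bq * (c0 - 1) + P * P) =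
          (Bq - 2 * (c0 - 1)) * (Bq - 2 * (c0 - 1)) - disc := by rw [hdd]; ring
      have hge : s + 2 ≤ Bq - 2 * (c0 - 1) := by omega
      have hs22 : (s + 2) * (s + 2) ≤ (Bq - 2 * (c0 - 1)) * (Bq - 2 * (c0 - 1)) :=
        mul_self_le_mul_self (by omega) hge
      nlinarith [hid, hs22, hs2]
    · omega
  have hu : y ≤ PySem.Int.floordiv P Q ↔ Q * y ≤ P := by
    rw [PySem.Int.le_floordiv_iff_mul_le (by omega), mul_comm]
  constructor
  · rintro ⟨h1, h2⟩
    have hP0 : 0 ≤ P := by nlinarith [mul_nonneg (by omega : (0:Int) ≤ Q) hy0]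
    have hyB : 2 * y ≤ Bq := by
      nlinarith [mul_nonneg (by omega : (0:Int) ≤ Q - 2) hy0,
        mul_nonneg (by omega : (0:Int) ≤ 2 * Q - 1) hP0, consec_nonneg x]
    have hid : (Bq - 2 * y) * (Bq - 2 * y) - disc = 4 * (y * y - Bq * y + P * P) := by
      rw [hdd]; ring
    have hsq : s * s ≤ (Bq - 2 * y) * (Bq - 2 * y) := by linarith
    have hys : s ≤ Bq - 2 * y := le_of_mul_self_le_mul_self (by omega) hsq hs0
    have hyc0 : y ≤ c0 := by omega
    have hyc : y ≤ c := by
      rw [hcd]; split_ifs with hneg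
      · rcases lt_or_eq_of_le hyc0 with hlt | heq
        · omega
        · subst heq; linarith
      · exact hyc0
    simp only [le_min_iff]
    exact ⟨hyc, hu.mpr h1⟩
  · intro hle
    simp only [le_min_iff] at hle
    obtain ⟨hyc, hyq⟩ := hle
    have h1 : Q * y ≤ P := hu.mp hyq
    refine ⟨h1, ?_⟩
    have hcB : c + y ≤ Bq := by omega
    have hprod : 0 ≤ (c - y) * (Bq - c - y) :=
      mul_nonneg (by omega) (by omega)
    have key : y * y - Bq * y + P * P = (c * c - Bq * c + P * P) + (c - y) * (Bq - c - y) := by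
      ring
    linarith

-- ===== VERDICT (by name: the statement is the Claim_ definition above) =====
set_option maxHeartbeats 1000000 in
theorem y_max_for_x_py_spec : Claim_equal_y_max_for_x_py := by
  intro m x _ hpre
  unfold Spec_y_max_for_x_py
  by_cases hg : 4 * x > m - 1
  · unfold y_max_for_x_py y_max_for_x_py_alt
    rw [if_pos hg, if_pos hg]
  · have hx : 1 ≤ x := by
      rcases hpre with h | h
      · exact h
      · omega
    have hg' : 4 * x ≤ m - 1 := by omega
    rw [alt_closed m x hg]
    unfold y_max_for_x_py
    rw [if_neg hg]
    show yLoopA m x x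
        (if PySem.Int.floordiv (m - 1) (4 * x) + 2 < x then x
         else PySem.Int.floordiv (m - 1) (4 * x) + 2) (x - 1) =
      (if x ≤ yB m x then yB m x else x - 1)
    set T := if x ≤ yB m x then yB m x else x - 1 with hTd
    set hi0 := PySem.Int.floordiv (m - 1) (4 * x) + 2 with hhi0
    have hG0 := closed_form m x hx hg'
    have hG : ∀ y, x ≤ y → ((min_n_and_square x y).1 ≤ m ↔ y ≤ T) := by
      intro y hyx
      rw [show ((min_n_and_square x y).1 ≤ m) = okv m x y from rfl, hG0 y hyx, hTd]
      split_ifs with hc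
      · rfl
      · constructor <;> intro h <;> omega
    have hThi : T ≤ (if hi0 < x then x else hi0) := by
      rw [hTd]
      split_ifs with hc h1 h2
      · -- x ≤ yB, hi0 < x : impossible unless yB small; use the bound
        have hok : okv m x (yB m x) := (hG0 (yB m x) hc).mpr le_rfl
        have hb := okv_bound m x (yB m x) hx hc hok
        have : yB m x ≤ PySem.Int.floordiv (m - 1) (4 * x) := by
          rw [PySem.Int.le_floordiv_iff_mul_le (by omega)]
          nlinarith
        omega
      · have hok : okv m x (yB m x) := (hG0 (yB m x) hc).mpr le_rfl
        have hb := okv_bound m x (yB m x) hx hc hok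
        have : yB m x ≤ PySem.Int.floordiv (m - 1) (4 * x) := by
          rw [PySem.Int.le_floordiv_iff_mul_le (by omega)]
          nlinarith
        omega
      · omega
      · omega
    have hTlo : T < x → (x - 1 : Int) = T := by
      rw [hTd]; split_ifs <;> omega
    exact yLoopA_eq m x T hG x (if hi0 < x then x else hi0) (x - 1) le_rfl hTlo hThi
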